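-- pv_equiv track=rewrite | github.com/Diego-MX/rfc-calculator | src/utilities/get_rfc.py | homoclave
-- ===== SOURCE A (Python) =====
-- LLAVES_1 = " 123456789&ABCDEFGHI~JKLMNOPQR~~STUVWXYZÑ"
--
-- LLAVES_2 = "123456789ABCDEFGHIJKLMNPQRSTUVWXYZ"
--
-- def homoclave(nombres: str) -> str:
--     # En realidad la homoclave consta de dos caracteres.
--     char_posiciones = [LLAVES_1.index(c_char) for c_char in list(nombres)]
--     posiciones_str  = ["0"] + [f"{c_pos:02}" for c_pos in char_posiciones]
--
--     cadena      = [int(c_char) for c_char in "".join(posiciones_str)]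
--     calc_trippy = sum(10*cadena[i]*cadena[i+1] + cadena[i+1]**2
--                        for i in range(len(cadena) - 1)) % 1000
--
--     cociente, residuo = calc_trippy // 34, calc_trippy % 34
--
--     homo_1      = LLAVES_2[cociente]
--     homo_2      = LLAVES_2[residuo ]
--
--     return (homo_1 + homo_2)
-- ===== SOURCE B (Python) =====
-- LLAVES_1 = " 123456789&ABCDEFGHI~JKLMNOPQR~~STUVWXYZÑ"
--
-- LLAVES_2 = "123456789ABCDEFGHIJKLMNPQRSTUVWXYZ"
--
-- def homoclave(nombres: str) -> str:
--     # One streaming pass: emit each position's two digits directly (pos//10, pos%10)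
--     # and accumulate the pairwise sum on the fly, instead of building the digit
--     # string, re-parsing it and summing over indices.
--     prev = 0  # the implicit leading '0' digit
--     acc = 0
--     for c in nombres:
--         pos = LLAVES_1.index(c)
--         for d in divmod(pos, 10):
--             acc += 10 * prev * d + d * d
--             prev = d
--     m = acc % 1000
--     cociente, residuo = divmod(m, 34)
--     return LLAVES_2[cociente] + LLAVES_2[residuo]
-- ===== Notes on version B (the rewrite author's own statement) =====
-- stated objective: alternative
-- what changed: Replaces A's three phases (format each position to a zero-padded string, join and re-parse into a digit list, then sum over index pairs) with a single streaming fold that emits each position's two digits as pos//10 and pos%10 and accumulates the pairwise checksum on the fly, never materialising the digit string or list.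
import Mathlib
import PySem

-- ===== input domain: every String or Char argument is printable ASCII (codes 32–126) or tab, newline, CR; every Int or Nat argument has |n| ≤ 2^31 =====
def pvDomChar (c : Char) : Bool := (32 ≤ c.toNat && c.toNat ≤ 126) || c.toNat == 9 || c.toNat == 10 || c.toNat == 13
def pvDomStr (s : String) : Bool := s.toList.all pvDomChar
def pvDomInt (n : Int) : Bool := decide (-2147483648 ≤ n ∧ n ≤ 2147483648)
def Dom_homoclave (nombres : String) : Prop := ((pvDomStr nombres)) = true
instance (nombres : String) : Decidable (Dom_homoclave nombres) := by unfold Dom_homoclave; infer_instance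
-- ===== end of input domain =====

-- B fuses A's build-digits / join-reparse / indexed-sum phases into one streaming fold over the input (objective: alternative decomposition, same cost).


-- ===== PORT A =====
def llaves1 : List Char := " 123456789&ABCDEFGHI~JKLMNOPQR~~STUVWXYZÑ".toList
def llaves2 : List Char := "123456789ABCDEFGHIJKLMNPQRSTUVWXYZ".toList

-- f"{c_pos:02}" for 0 ≤ c_pos: zero-pad str(c_pos) to width 2 (exact for every nonnegative int)
def fmt02 (p : Int) : List Char := if p < 10 then '0' :: PySem.Int.toChars p else PySem.Int.toChars p

-- LLAVES_1.index(c) raises ValueError when c is absent: index? is none there; the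
-- total .getD 0 form is used ONLY under Pre_homoclave (every char present).
-- int(ch) on a single char is PySem.Int.ofChars? [ch]; none (ValueError) never occurs
-- here since every ch is a decimal digit produced by the format above.
def homoclave (nombres : String) : String :=
  let charPos : List Int := nombres.toList.map (fun c => (((PySem.List.index? llaves1 c).getD 0 : Nat) : Int))
  let posStr : List (List Char) := [['0']] ++ charPos.map fmt02
  let cadena : List Int := posStr.flatten.map (fun ch => (PySem.Int.ofChars? [ch]).getD 0)
  let calcTrippy : Int := PySem.Int.mod
    (((PySem.List.pyRange 0 ((cadena.length : Int) - 1) 1).map (fun i =>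
        10 * PySem.List.pyGetD cadena i 0 * PySem.List.pyGetD cadena (i + 1) 0
          + (PySem.List.pyGetD cadena (i + 1) 0) ^ 2)).sum) 1000
  let cociente := PySem.Int.floordiv calcTrippy 34
  let residuo  := PySem.Int.mod calcTrippy 34
  String.ofList [PySem.List.pyGetD llaves2 cociente ' ', PySem.List.pyGetD llaves2 residuo ' ']

-- ===== PORT B =====
-- the loop body of Source B: acc += 10*prev*d + d*d; prev = d   (state = (prev, acc))
def hstep (st : Int × Int) (d : Int) : Int × Int := (d, st.2 + 10 * st.1 * d + d * d)

def homoclave_alt (nombres : String) : String :=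
  let st := nombres.toList.foldl (fun st c =>
      let pos : Int := (((PySem.List.index? llaves1 c).getD 0 : Nat) : Int)
      [PySem.Int.floordiv pos 10, PySem.Int.mod pos 10].foldl hstep st) ((0 : Int), (0 : Int))
  let m := PySem.Int.mod st.2 1000
  String.ofList [PySem.List.pyGetD llaves2 (PySem.Int.floordiv m 34) ' ',
             PySem.List.pyGetD llaves2 (PySem.Int.mod m 34) ' ']

-- ===== PRECONDITION & SPEC =====
-- Pre_ excludes exactly the inputs containing a character outside LLAVES_1, on which
-- both Python A and Python B raise ValueError (str.index).
def Pre_homoclave (nombres : String) : Prop :=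
  nombres.toList.all (fun c => c ∈ " 123456789&ABCDEFGHI~JKLMNOPQR~~STUVWXYZÑ".toList) = true
instance (nombres : String) : Decidable (Pre_homoclave nombres) := by unfold Pre_homoclave; infer_instance
def pvWitness_homoclave : String := "GODE561231GR8"

def Spec_homoclave (nombres : String) (out : String) : Prop := out = homoclave_alt nombres
instance (nombres : String) (out : String) : Decidable (Spec_homoclave nombres out) := by unfold Spec_homoclave; infer_instance

-- ===== CLAIM (what is proved, stated in full; the proofs are below) =====
def Claim_equal_homoclave : Prop := ∀ (nombres : String), Dom_homoclave nombres → Pre_homoclave nombres → Spec_homoclave nombres (homoclave nombres)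

-- ===== LEMMAS AND PROOFS =====
def posOf (c : Char) : Nat := (PySem.List.index? llaves1 c).getD 0

lemma posOf_lt (c : Char) : posOf c < 41 := by
  unfold posOf
  cases h : PySem.List.index? llaves1 c with
  | none => simp
  | some k =>
      obtain ⟨pre, suf, hls, hlen, -⟩ := (PySem.List.index?_eq_some_iff llaves1 c k).1 h
      have h41 : llaves1.length = 41 := by decide
      have := congrArg List.length hls
      simp at this
      simp only [Option.getD_some]
      omega

-- the two-digit format of p parses back to p's two decimal digits (p < 41 is all we need)
lemma digit_pair : ∀ p < 41, (fmt02 (p : Nat)).map (fun ch => (PySem.Int.ofChars? [ch]).getD 0)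
    = [((p / 10 : Nat) : Int), ((p % 10 : Nat) : Int)] := by decide

def pairSum : Int → List Int → Int
  | _, [] => 0
  | prev, d :: t => 10 * prev * d + d * d + pairSum d t

lemma foldl_hstep (ds : List Int) : ∀ prev acc,
    ds.foldl hstep (prev, acc) = (ds.getLastD prev, acc + pairSum prev ds) := by
  induction ds with
  | nil => intro prev acc; simp [pairSum]
  | cons d t ih =>
      intro prev acc
      simp only [List.foldl_cons, hstep, List.getLastD_cons, pairSum, ih]
      rw [Prod.mk.injEq]
      exact ⟨rfl, by ring⟩

lemma foldl_per_char (digits : Char → List Int) :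
    ∀ (cs : List Char) (init : Int × Int),
    cs.foldl (fun st c => (digits c).foldl hstep st) init = (cs.flatMap digits).foldl hstep init := by
  intro cs
  induction cs with
  | nil => intro init; simp
  | cons c t ih => intro init; simp [List.foldl_append, ih]

-- A's indexed sum over consecutive pairs of (a :: l), Nat-range form
lemma sum_pairs_nat : ∀ (l : List Int) (a : Int),
    ((List.range l.length).map (fun k =>
        10 * (a :: l).getD k 0 * (a :: l).getD (k + 1) 0 + ((a :: l).getD (k + 1) 0) ^ 2)).sum
      = pairSum a l := by
  intro l
  induction l with
  | nil => intro a; simp [pairSum]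
  | cons d t ih =>
      intro a
      rw [List.length_cons, List.range_succ_eq_map, List.map_cons, List.map_map, List.sum_cons]
      have hmap : ((List.range t.length).map (fun k =>
            10 * (d :: t).getD k 0 * (d :: t).getD (k + 1) 0 + ((d :: t).getD (k + 1) 0) ^ 2)).sum
          = pairSum d t := ih d
      have hcong : (List.range t.length).map ((fun k =>
            10 * (a :: d :: t).getD k 0 * (a :: d :: t).getD (k + 1) 0 + ((a :: d :: t).getD (k + 1) 0) ^ 2) ∘ Nat.succ)
          = (List.range t.length).map (fun k =>
            10 * (d :: t).getD k 0 * (d :: t).getD (k + 1) 0 + ((d :: t).getD (k + 1) 0) ^ 2) := by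
        apply List.map_congr_left
        intro k _
        simp [Function.comp]
      rw [hcong, hmap]
      simp only [List.getD_cons_zero, List.getD_cons_succ, pairSum]
      ring

-- bridge from the pyRange/pyGetD form A uses
lemma sum_pairs (l : List Int) (a : Int) :
    ((PySem.List.pyRange 0 ((l.length : Int)) 1).map (fun i =>
        10 * PySem.List.pyGetD (a :: l) i 0 * PySem.List.pyGetD (a :: l) (i + 1) 0
          + (PySem.List.pyGetD (a :: l) (i + 1) 0) ^ 2)).sum = pairSum a l := by
  rw [PySem.List.pyRange_zero_nat, List.map_map]
  have hcong : (List.range l.length).map ((fun i =>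
        10 * PySem.List.pyGetD (a :: l) i 0 * PySem.List.pyGetD (a :: l) (i + 1) 0
          + (PySem.List.pyGetD (a :: l) (i + 1) 0) ^ 2) ∘ (fun k : Nat => (k : Int)))
      = (List.range l.length).map (fun k =>
        10 * (a :: l).getD k 0 * (a :: l).getD (k + 1) 0 + ((a :: l).getD (k + 1) 0) ^ 2) := by
    apply List.map_congr_left
    intro k _
    have e : (k : Int) + 1 = ((k + 1 : Nat) : Int) := by push_cast; ring
    simp only [Function.comp_apply, e, PySem.List.pyGetD_natCast]
  rw [hcong]
  exact sum_pairs_nat l a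

-- cadena (without its leading 0) = the stream of digit pairs B generates
lemma cadena_stream : ∀ cs : List Char,
    (((cs.map (fun c => (((PySem.List.index? llaves1 c).getD 0 : Nat) : Int))).map fmt02).flatten.map
        (fun ch => (PySem.Int.ofChars? [ch]).getD 0))
    = cs.flatMap (fun c => [((posOf c / 10 : Nat) : Int), ((posOf c % 10 : Nat) : Int)]) := by
  intro cs
  induction cs with
  | nil => simp
  | cons c t ih =>
      simp only [List.map_cons, List.flatten_cons, List.map_append, List.flatMap_cons, ih]
      congr 1
      exact digit_pair (posOf c) (posOf_lt c)

lemma digits_eq (c : Char) :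
    [PySem.Int.floordiv (((PySem.List.index? llaves1 c).getD 0 : Nat) : Int) 10,
     PySem.Int.mod (((PySem.List.index? llaves1 c).getD 0 : Nat) : Int) 10]
    = [((posOf c / 10 : Nat) : Int), ((posOf c % 10 : Nat) : Int)] := by
  simp [posOf]

-- ===== VERDICT (by name: the statement is the Claim_ definition above) =====
theorem homoclave_spec : Claim_equal_homoclave := by
  intro nombres _ _
  unfold Spec_homoclave homoclave homoclave_alt
  simp only []
  -- rewrite B's fold into pairSum over the digit stream
  have hb : (nombres.toList.foldl (fun st c =>
      let pos : Int := (((PySem.List.index? llaves1 c).getD 0 : Nat) : Int)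
      [PySem.Int.floordiv pos 10, PySem.Int.mod pos 10].foldl hstep st) ((0 : Int), (0 : Int)))
      = ((nombres.toList.flatMap (fun c => [((posOf c / 10 : Nat) : Int), ((posOf c % 10 : Nat) : Int)])).foldl hstep ((0 : Int), (0 : Int))) := by
    rw [← foldl_per_char]
    apply PySem.List.foldl_congr_mem
    intro st c _
    simp only [digits_eq c]
  rw [hb]
  set ds := nombres.toList.flatMap (fun c => [((posOf c / 10 : Nat) : Int), ((posOf c % 10 : Nat) : Int)]) with hds
  rw [foldl_hstep ds 0 0]
  -- rewrite A's cadena and indexed sum into pairSum over the same stream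
  have hc : ((([['0']] ++ (nombres.toList.map (fun c => (((PySem.List.index? llaves1 c).getD 0 : Nat) : Int))).map fmt02).flatten).map
      (fun ch => (PySem.Int.ofChars? [ch]).getD 0)) = (0 : Int) :: ds := by
    rw [List.singleton_append, List.flatten_cons, List.map_append, hds, ← cadena_stream nombres.toList]
    have h0 : (['0'].map (fun ch => (PySem.Int.ofChars? [ch]).getD 0)) = [(0 : Int)] := by decide
    rw [h0, List.singleton_append]
  rw [hc]
  have hlen : (((0 : Int) :: ds).length : Int) - 1 = (ds.length : Int) := by
    simp
  rw [hlen, sum_pairs ds 0]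
  simp
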